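-- pv_equiv track=rewrite | github.com/ishubcg/ipms_roles_recommeder | backend/app/search_service.py | filter_roles_by_name
-- ===== SOURCE A (Python) =====
-- def normalize(text: str) -> str:
--     return " ".join(str(text).strip().lower().split())
--
-- def filter_roles_by_name(query: str, roles: list[dict]) -> list[dict]:
--     if not query or not query.strip():
--         return roles
--
--     q = normalize(query)
--     starts_with = []
--     contains = []
--
--     for role in roles:
--         role_name = normalize(role.get("role", ""))
--         if role_name.startswith(q):
--             starts_with.append(role)
--         elif q in role_name:
--             contains.append(role)
--
--     return starts_with + contains
-- ===== SOURCE B (Python) =====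
-- def normalize(text: str) -> str:
--     return " ".join(str(text).strip().lower().split())
--
-- def filter_roles_by_name(query: str, roles: list[dict]) -> list[dict]:
--     if not query or not query.strip():
--         return roles
--     q = normalize(query)
--     matched = [r for r in roles if q in normalize(r.get("role", ""))]
--     return sorted(matched, key=lambda r: 0 if normalize(r.get("role", "")).startswith(q) else 1)
-- ===== Notes on version B (the rewrite author's own statement) =====
-- stated objective: simpler
-- what changed: Replaces the single-pass two-bucket partition with a filter of all substring matches followed by a stable sort on a 0/1 prefix-priority key.
import Mathlib
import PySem

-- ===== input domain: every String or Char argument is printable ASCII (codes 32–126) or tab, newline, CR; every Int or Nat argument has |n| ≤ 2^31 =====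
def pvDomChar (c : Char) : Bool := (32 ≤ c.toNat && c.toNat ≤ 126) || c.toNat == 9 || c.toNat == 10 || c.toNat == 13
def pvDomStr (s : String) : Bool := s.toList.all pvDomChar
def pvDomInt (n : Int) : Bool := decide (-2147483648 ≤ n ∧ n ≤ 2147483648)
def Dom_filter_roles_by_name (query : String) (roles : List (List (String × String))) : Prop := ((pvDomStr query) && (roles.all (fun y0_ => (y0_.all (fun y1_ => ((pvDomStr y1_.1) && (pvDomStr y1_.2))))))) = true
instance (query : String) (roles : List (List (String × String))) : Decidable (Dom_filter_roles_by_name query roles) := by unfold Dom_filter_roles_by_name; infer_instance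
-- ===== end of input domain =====

-- B replaces A's two-bucket partition loop by filter + stable priority sort; objective: simpler.

-- ===== PORT A =====
def pyNormalize (text : String) : String :=
  PySem.Str.join " " (PySem.Str.split₀ (PySem.Str.lower (PySem.Str.strip text)))

def filter_roles_by_name (query : String) (roles : List (List (String × String))) : List (List (String × String)) :=
  if query = "" ∨ PySem.Str.strip query = "" then roles
  else
    let q := pyNormalize query
    let acc := roles.foldl (fun (acc : List (List (String × String)) × List (List (String × String))) role =>
      let role_name := pyNormalize (PySem.Dict.getD ⟨role⟩ "role" "")
      if PySem.Str.startswith role_name q then (acc.1 ++ [role], acc.2)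
      else if PySem.Str.isIn q role_name then (acc.1, acc.2 ++ [role])
      else acc) ([], [])
    acc.1 ++ acc.2

-- ===== PORT B =====
def filter_roles_by_name_alt (query : String) (roles : List (List (String × String))) : List (List (String × String)) :=
  if query = "" ∨ PySem.Str.strip query = "" then roles
  else
    let q := pyNormalize query
    let matched := roles.filter (fun r => PySem.Str.isIn q (pyNormalize (PySem.Dict.getD ⟨r⟩ "role" "")))
    PySem.List.sorted matched
      (fun r => if PySem.Str.startswith (pyNormalize (PySem.Dict.getD ⟨r⟩ "role" "")) q then (0 : Int) else 1)

-- ===== PRECONDITION & SPEC =====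
def Spec_filter_roles_by_name (query : String) (roles : List (List (String × String))) (out : List (List (String × String))) : Prop := out = filter_roles_by_name_alt query roles
instance (query : String) (roles : List (List (String × String))) (out : List (List (String × String))) : Decidable (Spec_filter_roles_by_name query roles out) := by unfold Spec_filter_roles_by_name; infer_instance

-- ===== CLAIM (what is proved, stated in full; the proofs are below) =====
def Claim_equal_filter_roles_by_name : Prop := ∀ (query : String) (roles : List (List (String × String))), Dom_filter_roles_by_name query roles → Spec_filter_roles_by_name query roles (filter_roles_by_name query roles)

-- ===== LEMMAS AND PROOFS =====

-- A's loop accumulates the two buckets: filter p and filter (c ∧ ¬p).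
theorem foldl_two_bucket {α : Type} (p c : α → Bool) (xs : List α)
    (s t : List α) :
    xs.foldl (fun (acc : List α × List α) x =>
      if p x then (acc.1 ++ [x], acc.2)
      else if c x then (acc.1, acc.2 ++ [x])
      else acc) (s, t)
    = (s ++ xs.filter p, t ++ xs.filter (fun x => c x && !p x)) := by
  induction xs generalizing s t with
  | nil => simp
  | cons x xs ih =>
    simp only [List.foldl_cons, List.filter_cons]
    by_cases hp : p x
    · simp [hp, ih]
    · by_cases hc : c x
      · simp [hp, hc, ih]
      · simp [hp, hc, ih]

theorem insertBy_append_left {α : Type} (bf : α → α → Bool) (x : α)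
    (ys zs : List α) (h : ∀ y ∈ ys, bf x y = false) :
    PySem.List.insertBy bf x (ys ++ zs) = ys ++ PySem.List.insertBy bf x zs := by
  induction ys with
  | nil => simp
  | cons y ys ih =>
    have hy : bf x y = false := h y (by simp)
    simp only [List.cons_append, PySem.List.insertBy, hy]
    simp only [Bool.false_eq_true, if_false]
    have := ih (fun y hy => h y (by simp [hy]))
    simp only [PySem.List.insertBy] at this
    simp [this]

theorem insertBy_of_head_before {α : Type} (bf : α → α → Bool) (x : α)
    (zs : List α) (h : ∀ z ∈ zs, bf x z = true) :
    PySem.List.insertBy bf x zs = x :: zs := by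
  cases zs with
  | nil => simp [PySem.List.insertBy]
  | cons z zs => simp [PySem.List.insertBy, h z (by simp)]

-- Stable sort on a {0,1}-valued key is filter-0 ++ filter-1.
theorem sorted_two_key {α : Type} (key : α → Int)
    (hk : ∀ x, key x = 0 ∨ key x = 1) (xs : List α) :
    PySem.List.sorted xs key
    = xs.filter (fun x => key x == 0) ++ xs.filter (fun x => key x != 0) := by
  rw [PySem.List.sorted_eq_foldl_insertBy]
  induction xs using List.reverseRecOn with
  | nil => simp
  | append_singleton xs x ih =>
    rw [List.foldl_append, List.foldl_cons, List.foldl_nil, ih]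
    rcases hk x with h0 | h1
    · rw [insertBy_append_left _ _ _ _ (by
        intro y hy
        simp only [List.mem_filter, beq_iff_eq] at hy
        simp [h0, hy.2])]
      rw [insertBy_of_head_before _ _ _ (by
        intro z hz
        simp only [List.mem_filter, bne_iff_ne] at hz
        rcases hk z with hz0 | hz1
        · exact absurd hz0 hz.2
        · simp [h0, hz1])]
      simp [List.filter_append, List.filter_cons, h0]
    · rw [PySem.List.insertBy_of_forall_not_before _ _ _ (by
        intro y hy
        rcases hk y with hy0 | hy1
        · simp [h1, hy0]
        · simp [h1, hy1])]
      simp [List.filter_append, h1]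

theorem sw_imp_isIn (s q : String) :
    PySem.Str.startswith s q = true → PySem.Str.isIn q s = true := by
  intro h
  rw [PySem.Str.startswith_eq, PySem.Chars.startswith_iff] at h
  rw [PySem.Str.isIn_iff_infix]
  exact h.isInfix

-- A's whole partition branch equals B's filter-then-stable-sort branch.
theorem bucket_eq_sorted {α : Type} (p c : α → Bool)
    (hpc : ∀ x, p x = true → c x = true) (xs : List α) :
    (xs.foldl (fun (acc : List α × List α) x =>
      if p x then (acc.1 ++ [x], acc.2)
      else if c x then (acc.1, acc.2 ++ [x])
      else acc) ([], [])).1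
    ++ (xs.foldl (fun (acc : List α × List α) x =>
      if p x then (acc.1 ++ [x], acc.2)
      else if c x then (acc.1, acc.2 ++ [x])
      else acc) ([], [])).2
    = PySem.List.sorted (xs.filter c) (fun x => if p x then (0 : Int) else 1) := by
  rw [foldl_two_bucket]
  rw [sorted_two_key (fun x => if p x then (0 : Int) else 1)
    (by intro x; by_cases h : p x <;> simp [h]) (xs.filter c)]
  rw [List.filter_filter, List.filter_filter]
  simp only [List.nil_append]
  congr 1
  · exact (List.filter_congr (fun x _ => by
      by_cases h : p x
      · simp [h, hpc x h]
      · simp [h])).symm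
  · exact (List.filter_congr (fun x _ => by
      by_cases h : p x <;> simp [h])).symm

-- ===== VERDICT (by name: the statement is the Claim_ definition above) =====
theorem filter_roles_by_name_spec : Claim_equal_filter_roles_by_name := by
  intro query roles _
  unfold Spec_filter_roles_by_name filter_roles_by_name filter_roles_by_name_alt
  by_cases hg : query = "" ∨ PySem.Str.strip query = ""
  · simp [hg]
  · simp only [hg, if_false]
    exact bucket_eq_sorted
      (fun role => PySem.Str.startswith (pyNormalize (PySem.Dict.getD ⟨role⟩ "role" "")) (pyNormalize query))
      (fun role => PySem.Str.isIn (pyNormalize query) (pyNormalize (PySem.Dict.getD ⟨role⟩ "role" "")))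
      (fun role => sw_imp_isIn _ _) roles
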